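-- pv_equiv track=rewrite | github.com/Flaab123/Christmas_tree_card | part4.py | base_postcard
-- ===== SOURCE A (Python) =====
-- def base_postcard(width,height):
--   card = []
--
--   # Create base tree, without decorations
--   for i in range(height):
--     cardline = [' ']*width
--     if i == 0 or i == height-1:
--       cardline[0:] = '-'*width
--     elif i == height-4:  #Tip of the tree
--       cardline[0:] = ' '*width
--       cardline[int(width/2-5):int(width/2+5)] = [x for x in 'Merry Xmas']
--       cardline[0] = '|'
--       cardline[-1] = '|'
--     else:
--       cardline[0:] = ' '*width
--       cardline[0] = '|'
--       cardline[-1] = '|'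
--     card.append(cardline)
--   return card
-- ===== SOURCE B (Python) =====
-- def base_postcard(width, height):
--     # Layered repaint: blank grid, then side borders, then dash rows, then the tip row.
--     card = [[' '] * width for _ in range(height)]
--     for row in card[1:height - 1]:
--         row[0] = '|'
--         row[-1] = '|'
--     for edge in ({0, height - 1} if card else ()):
--         card[edge][0:] = '-' * width
--     if height - 4 > 0:
--         row = card[height - 4]
--         row[0:] = ' ' * width
--         row[int(width / 2 - 5):int(width / 2 + 5)] = list('Merry Xmas')
--         row[0] = '|'
--         row[-1] = '|'
--     return card
-- ===== Notes on version B (the rewrite author's own statement) =====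
-- stated objective: alternative
-- what changed: Replaces A's single per-row loop with a branchy if/elif row builder by layered whole-grid passes: allocate a blank grid, paint side borders on interior rows, overwrite the top/bottom rows with dashes, then rebuild the tip row once.
import Mathlib
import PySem

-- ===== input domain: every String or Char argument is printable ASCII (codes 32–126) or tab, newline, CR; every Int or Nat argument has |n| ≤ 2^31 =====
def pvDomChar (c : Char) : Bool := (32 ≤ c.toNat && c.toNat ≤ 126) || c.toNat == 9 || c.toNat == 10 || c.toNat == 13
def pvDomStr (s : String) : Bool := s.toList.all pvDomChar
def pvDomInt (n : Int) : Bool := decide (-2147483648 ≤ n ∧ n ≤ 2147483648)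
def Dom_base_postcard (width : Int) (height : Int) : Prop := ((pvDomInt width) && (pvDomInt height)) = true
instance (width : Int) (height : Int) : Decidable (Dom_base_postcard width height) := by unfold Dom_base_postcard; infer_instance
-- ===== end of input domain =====

-- B builds the card in layered whole-grid passes (blank grid, side borders, dash edge rows, tip row)
-- instead of A's single per-row loop with an if/elif chain; same cost, different decomposition.

-- ===== PORT A =====
-- shared exact semantics helpers (used by both ports, for the same Python constructs)
-- [x for x in 'Merry Xmas']
def pvMerry : List String := ["M", "e", "r", "r", "y", " ", "X", "m", "a", "s"]
-- int(w/2 ± 5) = truncation toward zero of (w ± 10)/2 (halves are exact in float, so this is exact)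
def pvTrunc2 (x : Int) : Int := if 0 ≤ x then x / 2 else -((-x) / 2)
-- Python list slice assignment xs[a:b] = t (indices resolved with negative wrap + clamping)
def pvSliceAssign (xs : List String) (a b : Int) (t : List String) : List String :=
  let n : Int := (xs.length : Int)
  let a' : Nat := (if a < 0 then max (a + n) 0 else min a n).toNat
  let b' : Nat := (if b < 0 then max (b + n) 0 else min b n).toNat
  xs.take a' ++ t ++ xs.drop (max a' b')
-- xs[0] = v (Python raises on []; such inputs lie outside Pre_)
def pvSetHead (xs : List String) (v : String) : List String :=
  match xs with
  | [] => []
  | _ :: t => v :: t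
-- xs[-1] = v (Python raises on []; such inputs lie outside Pre_)
def pvSetLast (xs : List String) (v : String) : List String := xs.dropLast ++ [v]

-- the body of A's loop: the row built for index i
def pvRowA (width : Int) (height : Int) (i : Int) : List String :=
  if i == 0 || i == height - 1 then
    List.replicate width.toNat "-"
  else if i == height - 4 then
    pvSetLast (pvSetHead (pvSliceAssign (List.replicate width.toNat " ")
      (pvTrunc2 (width - 10)) (pvTrunc2 (width + 10)) pvMerry) "|") "|"
  else
    pvSetLast (pvSetHead (List.replicate width.toNat " ") "|") "|"

def base_postcard (width : Int) (height : Int) : List (List String) :=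
  (PySem.List.pyRange 0 height 1).foldl
    (fun card i => card ++ [pvRowA width height i]) []

-- ===== PORT B =====
def base_postcard_alt (width : Int) (height : Int) : List (List String) :=
  let h : Nat := height.toNat
  let card : List (List String) := (List.range h).map (fun _ => List.replicate width.toNat " ")
  -- side borders on the interior rows card[1:height-1]
  let card := card.mapIdx (fun i row =>
    if 1 ≤ i ∧ i + 1 < h then pvSetLast (pvSetHead row "|") "|" else row)
  -- top and bottom dash rows
  let card := if h = 0 then card else
    (card.set 0 (List.replicate width.toNat "-")).set (h - 1) (List.replicate width.toNat "-")
  -- tip row, rebuilt from blank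
  if 0 < height - 4 then
    card.set (h - 4)
      (pvSetLast (pvSetHead (pvSliceAssign (List.replicate width.toNat " ")
        (pvTrunc2 (width - 10)) (pvTrunc2 (width + 10)) pvMerry) "|") "|")
  else card

-- ===== PRECONDITION & SPEC =====
-- Pre_ excludes exactly the inputs where Python A raises IndexError: height ≥ 3 creates
-- interior rows, whose `cardline[0] = '|'` needs a nonempty row, i.e. width ≥ 1.
def Pre_base_postcard (width : Int) (height : Int) : Prop := 3 ≤ height → 1 ≤ width
instance (width : Int) (height : Int) : Decidable (Pre_base_postcard width height) := by
  unfold Pre_base_postcard; infer_instance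
def pvWitness_base_postcard : Int × Int := (12, 9)

def Spec_base_postcard (width : Int) (height : Int) (out : List (List String)) : Prop := out = base_postcard_alt width height
instance (width : Int) (height : Int) (out : List (List String)) : Decidable (Spec_base_postcard width height out) := by unfold Spec_base_postcard; infer_instance

-- ===== CLAIM (what is proved, stated in full; the proofs are below) =====
def Claim_equal_base_postcard : Prop := ∀ (width : Int) (height : Int), Dom_base_postcard width height → Pre_base_postcard width height → Spec_base_postcard width height (base_postcard width height)

-- ===== LEMMAS AND PROOFS =====

theorem ports_eq (width height : Int) :
    base_postcard width height = base_postcard_alt width height := by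
  unfold base_postcard base_postcard_alt
  rw [PySem.List.foldl_append_singleton_eq_map, PySem.List.pyRange_one]
  simp only [List.nil_append, Int.sub_zero, Int.zero_add]
  split_ifs with htip hz hz <;>
  · apply List.ext_getElem
    · simp
    · intro i h1 h2
      simp only [List.getElem_map, List.getElem_range, List.getElem_set,
        List.getElem_mapIdx, pvRowA, Bool.or_eq_true,
        beq_iff_eq]
      simp only [List.length_map, List.length_range] at h1
      split_ifs <;> first | rfl | omega

-- ===== VERDICT (by name: the statement is the Claim_ definition above) =====
theorem base_postcard_spec : Claim_equal_base_postcard := by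
  intro width height _ _
  unfold Spec_base_postcard
  exact ports_eq width height
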